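-- pv_equiv track=rewrite | github.com/santule/indelmip | scripts/indel_scoring.py | sequence_distance_score
-- ===== SOURCE A (Python) =====
-- def sequence_distance_score(str1,str2):
--     dis = 0
--     prev_dis = 0
--
--     for i in range(0,len(str1)):
--         if str1[i] != str2[i]:  # not matching
--             if prev_dis == 0:   # previous matches
--                 dis += 6
--                 prev_dis = 1
--             else:
--                 dis += 1
--         else:
--             prev_dis = 0
--     return dis
-- ===== SOURCE B (Python) =====
-- def sequence_distance_score(str1, str2):
--     # mismatch indicator per position; indexing str2[i] so a shorter str2 raises like A
--     mism = [str1[i] != str2[i] for i in range(len(str1))]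
--     total = sum(mism)
--     runs = sum(1 for prev, cur in zip([False] + mism, mism) if cur and not prev)
--     return total + 5 * runs
-- ===== Notes on version B (the rewrite author's own statement) =====
-- stated objective: alternative
-- what changed: Replaces the stateful prev_dis loop by a mismatch-indicator list aggregated with two counts (total mismatches and number of mismatch-run starts) combined by the closed form total + 5*runs.
import Mathlib
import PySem

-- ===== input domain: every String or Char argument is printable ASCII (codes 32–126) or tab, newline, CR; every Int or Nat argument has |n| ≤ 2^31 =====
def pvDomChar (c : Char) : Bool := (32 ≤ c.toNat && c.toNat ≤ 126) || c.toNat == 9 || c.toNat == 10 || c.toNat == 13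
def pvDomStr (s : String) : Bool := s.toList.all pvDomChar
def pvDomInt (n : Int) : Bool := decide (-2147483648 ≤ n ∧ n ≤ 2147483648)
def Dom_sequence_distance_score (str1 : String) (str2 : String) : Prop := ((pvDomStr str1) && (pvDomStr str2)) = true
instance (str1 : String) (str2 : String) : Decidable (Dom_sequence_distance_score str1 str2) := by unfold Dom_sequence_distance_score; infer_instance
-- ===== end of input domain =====

-- B replaces A's stateful prev_dis loop by a mismatch-indicator list aggregated with two
-- counts (mismatch total and run starts) combined as total + 5*runs; same O(n) cost.


-- ===== PORT A =====
def sequence_distance_score (str1 : String) (str2 : String) : Int :=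
  let l1 := str1.toList
  let l2 := str2.toList
  let st := (PySem.List.pyRange 0 l1.length 1).foldl
    (fun (s : Int × Int) (i : Int) =>
      if PySem.List.pyGetD l1 i ' ' ≠ PySem.List.pyGetD l2 i ' ' then
        if s.2 = 0 then (s.1 + 6, 1) else (s.1 + 1, s.2)
      else (s.1, 0))
    (0, 0)
  st.1

-- ===== PORT B =====
def sequence_distance_score_alt (str1 : String) (str2 : String) : Int :=
  let l1 := str1.toList
  let l2 := str2.toList
  let mism : List Bool :=
    (PySem.List.pyRange 0 l1.length 1).map
      (fun (i : Int) => PySem.List.pyGetD l1 i ' ' != PySem.List.pyGetD l2 i ' ')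
  let total : Int := (mism.map (fun b => if b then (1 : Int) else 0)).sum
  let runs : Int := (((false :: mism).zip mism).filter (fun pc => pc.2 && !pc.1)).length
  total + 5 * runs

-- ===== PRECONDITION & SPEC =====
-- Pre_ excludes exactly the inputs where str2 is shorter than str1: there A (and B alike)
-- raises IndexError when indexing str2[i].
def Pre_sequence_distance_score (str1 : String) (str2 : String) : Prop :=
  str1.toList.length ≤ str2.toList.length
instance (str1 : String) (str2 : String) : Decidable (Pre_sequence_distance_score str1 str2) := by
  unfold Pre_sequence_distance_score; infer_instance
def pvWitness_sequence_distance_score : String × String := ("abca", "axcb")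

def Spec_sequence_distance_score (str1 : String) (str2 : String) (out : Int) : Prop := out = sequence_distance_score_alt str1 str2
instance (str1 : String) (str2 : String) (out : Int) : Decidable (Spec_sequence_distance_score str1 str2 out) := by unfold Spec_sequence_distance_score; infer_instance

-- ===== CLAIM (what is proved, stated in full; the proofs are below) =====
def Claim_equal_sequence_distance_score : Prop := ∀ (str1 : String) (str2 : String), Dom_sequence_distance_score str1 str2 → Pre_sequence_distance_score str1 str2 → Spec_sequence_distance_score str1 str2 (sequence_distance_score str1 str2)

-- ===== LEMMAS AND PROOFS =====

-- run-start counter with explicit previous flag (proof-only helper)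
def pvRuns : Bool → List Bool → Nat
  | _, [] => 0
  | p, b :: t => (if b && !p then 1 else 0) + pvRuns b t

def pvTotal (m : List Bool) : Int := (m.map (fun b => if b then (1 : Int) else 0)).sum

-- A's fold over the mismatch booleans, characterised by pvTotal and pvRuns
lemma pvFoldA_char (m : List Bool) :
    ∀ (d p : Int),
      ((m.foldl (fun (s : Int × Int) (b : Bool) =>
          if b then (if s.2 = 0 then (s.1 + 6, 1) else (s.1 + 1, s.2)) else (s.1, 0))
        (d, p)).1 : Int)
      = d + pvTotal m + 5 * pvRuns (!(p == 0)) m := by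
  induction m with
  | nil => intro d p; simp [pvTotal, pvRuns]
  | cons b t ih =>
    intro d p
    cases b with
    | false =>
      simp [pvRuns, pvTotal, ih]
    | true =>
      by_cases hp : p = 0
      · subst hp
        simp [pvRuns, pvTotal, ih]
        ring_nf
      · have hpb : (p == 0) = false := by simp [hp]
        simp [pvRuns, pvTotal, ih, hp, hpb]
        ring_nf

-- foldl over a mapped list (explicit-argument version of List.foldl_map)
lemma pvFoldl_map {A B C : Type} (f : B → C) (g : A → C → A) (l : List B) (init : A) :
    (l.map f).foldl g init = l.foldl (fun x y => g x (f y)) init := by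
  induction l generalizing init with
  | nil => rfl
  | cons b t ih => simp [ih]

-- B's zip-filter run count equals pvRuns
lemma pvZip_runs (m : List Bool) :
    ∀ (p : Bool),
      (((p :: m).zip m).filter (fun pc : Bool × Bool => pc.2 && !pc.1)).length = pvRuns p m := by
  induction m with
  | nil => intro p; simp [pvRuns]
  | cons b t ih =>
    intro p
    simp only [List.zip_cons_cons, List.filter_cons, pvRuns]
    by_cases h : (b && !p) = true
    · simp [h, ih b, Nat.add_comm]
    · simp [h, ih b]

-- both ports, expressed over the character lists
lemma pvMain (l1 l2 : List Char) :
    ((PySem.List.pyRange 0 l1.length 1).foldl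
      (fun (s : Int × Int) (i : Int) =>
        if PySem.List.pyGetD l1 i ' ' ≠ PySem.List.pyGetD l2 i ' ' then
          if s.2 = 0 then (s.1 + 6, 1) else (s.1 + 1, s.2)
        else (s.1, 0)) ((0 : Int), (0 : Int))).1
    = (let mism : List Bool :=
         (PySem.List.pyRange 0 l1.length 1).map
           (fun (i : Int) => PySem.List.pyGetD l1 i ' ' != PySem.List.pyGetD l2 i ' ');
       pvTotal mism
         + 5 * ((((false :: mism).zip mism).filter (fun pc => pc.2 && !pc.1)).length : Int)) := by
  have hfun :
      (fun (s : Int × Int) (i : Int) =>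
        if PySem.List.pyGetD l1 i ' ' ≠ PySem.List.pyGetD l2 i ' ' then
          if s.2 = 0 then (s.1 + 6, 1) else (s.1 + 1, s.2)
        else (s.1, 0))
      = (fun (s : Int × Int) (i : Int) =>
          if (PySem.List.pyGetD l1 i ' ' != PySem.List.pyGetD l2 i ' ') then
            if s.2 = 0 then (s.1 + 6, 1) else (s.1 + 1, s.2)
          else (s.1, 0)) := by
    funext s i
    by_cases h : PySem.List.pyGetD l1 i ' ' = PySem.List.pyGetD l2 i ' ' <;> simp [h]
  rw [hfun, show ((PySem.List.pyRange 0 l1.length 1).foldl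
      (fun (s : Int × Int) (i : Int) =>
        if (PySem.List.pyGetD l1 i ' ' != PySem.List.pyGetD l2 i ' ') then
          if s.2 = 0 then (s.1 + 6, 1) else (s.1 + 1, s.2)
        else (s.1, 0)) ((0 : Int), (0 : Int)))
    = (((PySem.List.pyRange 0 l1.length 1).map
         (fun (i : Int) => PySem.List.pyGetD l1 i ' ' != PySem.List.pyGetD l2 i ' ')).foldl
        (fun (s : Int × Int) (b : Bool) =>
          if b then (if s.2 = 0 then (s.1 + 6, 1) else (s.1 + 1, s.2)) else (s.1, 0))
        ((0 : Int), (0 : Int))) from (pvFoldl_map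
        (fun (i : Int) => PySem.List.pyGetD l1 i ' ' != PySem.List.pyGetD l2 i ' ')
        (fun (s : Int × Int) (b : Bool) =>
          if b then (if s.2 = 0 then (s.1 + 6, 1) else (s.1 + 1, s.2)) else (s.1, 0))
        (PySem.List.pyRange 0 l1.length 1) ((0 : Int), (0 : Int))).symm,
    pvFoldA_char]
  simp [pvZip_runs, pvTotal]

-- ===== VERDICT (by name: the statement is the Claim_ definition above) =====
theorem sequence_distance_score_spec : Claim_equal_sequence_distance_score := by
  intro str1 str2 _ _
  unfold Spec_sequence_distance_score sequence_distance_score sequence_distance_score_alt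
  exact pvMain str1.toList str2.toList
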